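-- pv_equiv track=rewrite | github.com/HarryAidanCSC/Advent-Of-Code | 2023/21/aoc_21.py | bfs_with_max_steps
-- ===== SOURCE A (Python) =====
-- from collections import deque
--
-- def bfs_with_max_steps(graph, start, max_steps):
--     queue = deque([(start, 0)])
--     visited_at_level = {start: 0}
--     result = []
--
--     while queue:
--         node, steps = queue.popleft()
--
--         if steps <= max_steps:
--             result.append((node, steps))
--
--         if steps >= max_steps:
--             continue
--
--         for neighbor in graph[node]:
--             if (
--                 neighbor not in visited_at_level
--                 or visited_at_level[neighbor] > steps + 1
--             ):
--                 visited_at_level[neighbor] = steps + 1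
--                 queue.append((neighbor, steps + 1))
--
--     return result
-- ===== SOURCE B (Python) =====
-- def bfs_with_max_steps(graph, start, max_steps):
--     # Level-synchronous BFS: expand one whole frontier per step count.
--     if max_steps < 0:
--         return []
--     result = []
--     frontier = [start]
--     visited = {start}
--     for steps in range(max_steps + 1):
--         for node in frontier:
--             result.append((node, steps))
--         if steps == max_steps:
--             break
--         nxt = []
--         for node in frontier:
--             for nb in graph[node]:
--                 if nb not in visited:
--                     visited.add(nb)
--                     nxt.append(nb)
--         frontier = nxt
--         if not frontier:
--             break
--     return result
-- ===== Notes on version B (the rewrite author's own statement) =====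
-- stated objective: alternative
-- what changed: A's single-queue BFS carrying (node,steps) pairs and a node->distance dict (with a never-firing distance-improvement re-enqueue check) is replaced by a level-synchronous BFS that expands one whole frontier list per step count with a plain visited set.
import Mathlib
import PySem

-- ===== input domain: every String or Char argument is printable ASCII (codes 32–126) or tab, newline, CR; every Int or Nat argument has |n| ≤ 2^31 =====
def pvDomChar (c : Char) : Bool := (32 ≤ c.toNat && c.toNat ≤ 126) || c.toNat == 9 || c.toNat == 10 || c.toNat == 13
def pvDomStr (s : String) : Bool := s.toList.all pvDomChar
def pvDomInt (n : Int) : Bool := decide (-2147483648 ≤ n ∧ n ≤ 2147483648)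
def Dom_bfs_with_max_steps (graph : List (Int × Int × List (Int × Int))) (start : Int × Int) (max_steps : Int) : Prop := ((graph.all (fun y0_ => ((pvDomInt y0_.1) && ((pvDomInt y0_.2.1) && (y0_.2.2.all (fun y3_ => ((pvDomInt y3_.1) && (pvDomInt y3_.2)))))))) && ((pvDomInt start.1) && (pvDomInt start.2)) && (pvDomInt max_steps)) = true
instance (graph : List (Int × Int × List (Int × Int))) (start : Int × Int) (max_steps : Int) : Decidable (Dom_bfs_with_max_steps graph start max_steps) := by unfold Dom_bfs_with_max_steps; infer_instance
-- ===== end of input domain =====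

-- B replaces A's single-queue BFS (queue of (node,steps) pairs + node->distance dict)
-- by a level-synchronous BFS expanding one whole frontier list per step count with a
-- visited set; same return value on Pre_ (alternative decomposition, no speed claim).


-- ===== PORT A =====

-- graph[node]: first entry whose key (first two components) equals node; `none` would be
-- Python's KeyError — excluded by Pre_, the total form returns [] there.
def nbrsOf (graph : List (Int × Int × List (Int × Int))) (n : Int × Int) : List (Int × Int) :=
  match graph.find? (fun e => (e.1, e.2.1) == n) with
  | some e => e.2.2
  | none => []

-- the inner `for neighbor in graph[node]` loop of A
def pushNbrs (graph : List (Int × Int × List (Int × Int))) (node : Int × Int) (steps : Int)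
    (acc : List ((Int × Int) × Int) × PySem.Dict (Int × Int) Int) :
    List ((Int × Int) × Int) × PySem.Dict (Int × Int) Int :=
  (nbrsOf graph node).foldl (fun qv nb =>
    match qv.2.get? nb with
    | none => (qv.1 ++ [(nb, steps + 1)], qv.2.insert nb (steps + 1))
    | some d => if d > steps + 1 then (qv.1 ++ [(nb, steps + 1)], qv.2.insert nb (steps + 1)) else qv) acc

-- the `while queue` loop of A; the fuel guard only makes the recursion total
-- (graph.length * max_steps.toNat + 1 pops suffice on every input Pre_ admits)
def loopA (graph : List (Int × Int × List (Int × Int))) (max_steps : Int) :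
    Nat → List ((Int × Int) × Int) → PySem.Dict (Int × Int) Int → List ((Int × Int) × Int) →
    List ((Int × Int) × Int)
  | 0, _, _, res => res
  | _ + 1, [], _, res => res
  | fuel + 1, (node, steps) :: qs, vis, res =>
    let res' := if steps ≤ max_steps then res ++ [(node, steps)] else res
    if max_steps ≤ steps then loopA graph max_steps fuel qs vis res'
    else
      let qv := pushNbrs graph node steps (qs, vis)
      loopA graph max_steps fuel qv.1 qv.2 res'

def bfs_with_max_steps (graph : List (Int × Int × List (Int × Int))) (start : Int × Int) (max_steps : Int) : List ((Int × Int) × Int) :=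
  loopA graph max_steps (graph.length * max_steps.toNat + 1) [(start, 0)]
    (PySem.Dict.empty.insert start 0) []

-- ===== PORT B =====

-- inner `for nb in graph[node]` of B: collect unseen neighbours, marking them seen
def collectNew (nbrs : List (Int × Int)) (acc : List (Int × Int) × PySem.Set (Int × Int)) :
    List (Int × Int) × PySem.Set (Int × Int) :=
  nbrs.foldl (fun a nb =>
    if PySem.Set.contains a.2 nb then a else (a.1 ++ [nb], PySem.Set.add a.2 nb)) acc

-- `nxt = []; for node in frontier: ...` of B
def expandB (graph : List (Int × Int × List (Int × Int))) (frontier : List (Int × Int))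
    (acc : List (Int × Int) × PySem.Set (Int × Int)) :
    List (Int × Int) × PySem.Set (Int × Int) :=
  frontier.foldl (fun a node => collectNew (nbrsOf graph node) a) acc

-- `for steps in range(max_steps + 1)` with the two breaks, as countdown recursion
def loopB (graph : List (Int × Int × List (Int × Int))) :
    Nat → Int → List (Int × Int) → PySem.Set (Int × Int) → List ((Int × Int) × Int) →
    List ((Int × Int) × Int)
  | 0, steps, frontier, _, res => res ++ frontier.map (fun n => (n, steps))
  | r + 1, steps, frontier, visited, res =>
    let res' := res ++ frontier.map (fun n => (n, steps))
    let fv := expandB graph frontier ([], visited)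
    if fv.1 = [] then res' else loopB graph r (steps + 1) fv.1 fv.2 res'

def bfs_with_max_steps_alt (graph : List (Int × Int × List (Int × Int))) (start : Int × Int) (max_steps : Int) : List ((Int × Int) × Int) :=
  if max_steps < 0 then []
  else loopB graph max_steps.toNat 0 [start] (PySem.Set.ofList [start]) []

-- ===== PRECONDITION & SPEC =====

def keysOf (graph : List (Int × Int × List (Int × Int))) : List (Int × Int) :=
  graph.map (fun e => (e.1, e.2.1))

-- Pre_ excludes the inputs where Python A raises KeyError (a looked-up node is not a key of
-- graph). It asks for a closed graph (start and every listed neighbour are keys) whenever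
-- max_steps > 0; this is slightly narrower than necessary — it also excludes graphs whose
-- only missing nodes sit exactly at distance max_steps or are unreachable, where A still
-- returns (see the cite in claim.json).
def Pre_bfs_with_max_steps (graph : List (Int × Int × List (Int × Int))) (start : Int × Int) (max_steps : Int) : Prop :=
  max_steps ≤ 0 ∨
    (start ∈ keysOf graph ∧ ∀ e ∈ graph, ∀ nb ∈ e.2.2, nb ∈ keysOf graph)

instance (graph : List (Int × Int × List (Int × Int))) (start : Int × Int) (max_steps : Int) : Decidable (Pre_bfs_with_max_steps graph start max_steps) := by
  unfold Pre_bfs_with_max_steps; infer_instance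

def pvWitness_bfs_with_max_steps : (List (Int × Int × List (Int × Int))) × (Int × Int) × Int :=
  ([(0, 0, [(0, 1)]), (0, 1, [])], (0, 0), 2)

def Spec_bfs_with_max_steps (graph : List (Int × Int × List (Int × Int))) (start : Int × Int) (max_steps : Int) (out : List ((Int × Int) × Int)) : Prop := out = bfs_with_max_steps_alt graph start max_steps
instance (graph : List (Int × Int × List (Int × Int))) (start : Int × Int) (max_steps : Int) (out : List ((Int × Int) × Int)) : Decidable (Spec_bfs_with_max_steps graph start max_steps out) := by unfold Spec_bfs_with_max_steps; infer_instance

-- ===== CLAIM (what is proved, stated in full; the proofs are below) =====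
def Claim_equal_bfs_with_max_steps : Prop := ∀ (graph : List (Int × Int × List (Int × Int))) (start : Int × Int) (max_steps : Int), Dom_bfs_with_max_steps graph start max_steps → Pre_bfs_with_max_steps graph start max_steps → Spec_bfs_with_max_steps graph start max_steps (bfs_with_max_steps graph start max_steps)

-- ===== LEMMAS AND PROOFS =====

-- proof-only helper: the sub-list of nbrs not yet seen, first occurrences, in order
def freshL (visB : List (Int × Int)) : List (Int × Int) → List (Int × Int)
  | [] => []
  | nb :: rest => if nb ∈ visB then freshL visB rest else nb :: freshL (visB ++ [nb]) rest

-- proof-only helper: exact number of queue pops A performs from a frontier F onwards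
def needed (graph : List (Int × Int × List (Int × Int))) :
    Nat → List (Int × Int) → List (Int × Int) → Nat
  | 0, F, _ => F.length
  | r + 1, F, visB =>
    F.length + needed graph r (expandB graph F ([], visB)).1 (expandB graph F ([], visB)).2

lemma loopA_nil (graph : List (Int × Int × List (Int × Int))) (M : Int) (fuel : Nat)
    (vis : PySem.Dict (Int × Int) Int) (res : List ((Int × Int) × Int)) :
    loopA graph M fuel [] vis res = res := by
  cases fuel <;> rfl

lemma collectNew_eq_freshL (nbrs : List (Int × Int)) :
    ∀ (nf visB : List (Int × Int)),
    collectNew nbrs (nf, visB) = (nf ++ freshL visB nbrs, visB ++ freshL visB nbrs) := by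
  induction nbrs with
  | nil => intro nf visB; simp [collectNew, freshL]
  | cons nb rest ih =>
    intro nf visB
    by_cases h : nb ∈ visB
    · have : collectNew (nb :: rest) (nf, visB) = collectNew rest (nf, visB) := by
        simp [collectNew, PySem.Set.contains_eq_listContains, h]
      rw [this, ih, freshL]
      simp [h]
    · have : collectNew (nb :: rest) (nf, visB)
          = collectNew rest (nf ++ [nb], visB ++ [nb]) := by
        simp [collectNew, PySem.Set.contains_eq_listContains, h]
      rw [this, ih, freshL]
      simp [h]

lemma freshL_mem {n : Int × Int} : ∀ (l visB : List (Int × Int)),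
    n ∈ freshL visB l → n ∈ l ∧ n ∉ visB := by
  intro l
  induction l with
  | nil => intro visB h; simp [freshL] at h
  | cons nb rest ih =>
    intro visB h
    rw [freshL] at h
    by_cases hm : nb ∈ visB
    · simp [hm] at h
      rcases ih visB h with ⟨h1, h2⟩
      exact ⟨List.mem_cons_of_mem _ h1, h2⟩
    · simp [hm] at h
      rcases h with h | h
      · subst h; exact ⟨List.mem_cons_self, hm⟩
      · rcases ih (visB ++ [nb]) h with ⟨h1, h2⟩
        simp at h2
        exact ⟨List.mem_cons_of_mem _ h1, h2.1⟩

lemma freshL_nodup : ∀ (l visB : List (Int × Int)), (freshL visB l).Nodup := by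
  intro l
  induction l with
  | nil => intro visB; simp [freshL]
  | cons nb rest ih =>
    intro visB
    rw [freshL]
    by_cases hm : nb ∈ visB
    · simp [hm]; exact ih visB
    · simp [hm]
      refine ⟨fun hc => ?_, ih (visB ++ [nb])⟩
      have := (freshL_mem _ _ hc).2
      simp at this

lemma pushAux (s : Int) : ∀ (l : List (Int × Int)) (qs : List ((Int × Int) × Int))
      (vis : PySem.Dict (Int × Int) Int) (visB : List (Int × Int)),
    (∀ n, (vis.get? n).isSome ↔ n ∈ visB) →
    (∀ n d, vis.get? n = some d → d ≤ s + 1) →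
    ∃ vis',
      l.foldl (fun qv nb =>
        match qv.2.get? nb with
        | none => (qv.1 ++ [(nb, s + 1)], qv.2.insert nb (s + 1))
        | some d => if d > s + 1 then (qv.1 ++ [(nb, s + 1)], qv.2.insert nb (s + 1)) else qv)
        (qs, vis)
        = (qs ++ (freshL visB l).map (fun n => (n, s + 1)), vis') ∧
      (∀ n, (vis'.get? n).isSome ↔ n ∈ visB ++ freshL visB l) ∧
      (∀ n d, vis'.get? n = some d → d ≤ s + 1) := by
  intro l
  induction l with
  | nil =>
    intro qs vis visB hR hLe
    exact ⟨vis, by simp [freshL], by simpa [freshL] using hR, hLe⟩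
  | cons nb rest ih =>
    intro qs vis visB hR hLe
    rw [List.foldl_cons]
    by_cases hm : nb ∈ visB
    · have hsome : (vis.get? nb).isSome := (hR nb).2 hm
      obtain ⟨d, hd⟩ := Option.isSome_iff_exists.1 hsome
      have hle := hLe nb d hd
      have hstep : (match vis.get? nb with
        | none => (qs ++ [(nb, s + 1)], vis.insert nb (s + 1))
        | some d => if d > s + 1 then (qs ++ [(nb, s + 1)], vis.insert nb (s + 1)) else (qs, vis))
          = (qs, vis) := by
        rw [hd]; simp; omega
      rw [hstep]
      obtain ⟨vis', h1, h2, h3⟩ := ih qs vis visB hR hLe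
      refine ⟨vis', ?_, ?_, h3⟩
      · rw [h1, freshL]; simp [hm]
      · rw [freshL]; simp only [hm, if_true]; exact h2
    · have hnone : vis.get? nb = none := by
        rcases h : vis.get? nb with _ | d
        · rfl
        · exact absurd ((hR nb).1 (by simp [h])) hm
      have hstep : (match vis.get? nb with
        | none => (qs ++ [(nb, s + 1)], vis.insert nb (s + 1))
        | some d => if d > s + 1 then (qs ++ [(nb, s + 1)], vis.insert nb (s + 1)) else (qs, vis))
          = (qs ++ [(nb, s + 1)], vis.insert nb (s + 1)) := by
        rw [hnone]
      rw [hstep]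
      have hR' : ∀ n, ((vis.insert nb (s + 1)).get? n).isSome ↔ n ∈ visB ++ [nb] := by
        intro n
        rw [PySem.Dict.get?_insert]
        by_cases hn : n = nb <;> simp [hn, hR n]
      have hLe' : ∀ n d, (vis.insert nb (s + 1)).get? n = some d → d ≤ s + 1 := by
        intro n d hnd
        rw [PySem.Dict.get?_insert] at hnd
        by_cases hn : n = nb
        · simp [hn] at hnd; omega
        · simp [hn] at hnd; exact hLe n d hnd
      obtain ⟨vis', h1, h2, h3⟩ := ih (qs ++ [(nb, s + 1)]) (vis.insert nb (s + 1)) (visB ++ [nb]) hR' hLe'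
      refine ⟨vis', ?_, ?_, h3⟩
      · rw [h1, freshL]; simp [hm]
      · intro n
        rw [h2 n, freshL]
        simp [hm]

lemma pushNbrs_eq (graph : List (Int × Int × List (Int × Int))) (node : Int × Int) (s : Int) :
    ∀ (qs : List ((Int × Int) × Int)) (vis : PySem.Dict (Int × Int) Int) (visB : List (Int × Int)),
    (∀ n, (vis.get? n).isSome ↔ n ∈ visB) →
    (∀ n d, vis.get? n = some d → d ≤ s + 1) →
    ∃ vis',
      pushNbrs graph node s (qs, vis)
        = (qs ++ (freshL visB (nbrsOf graph node)).map (fun n => (n, s + 1)), vis') ∧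
      (∀ n, (vis'.get? n).isSome ↔ n ∈ visB ++ freshL visB (nbrsOf graph node)) ∧
      (∀ n d, vis'.get? n = some d → d ≤ s + 1) := by
  intro qs vis visB hR hLe
  exact pushAux s (nbrsOf graph node) qs vis visB hR hLe

lemma levelA (graph : List (Int × Int × List (Int × Int))) (M s : Int) (hs : s < M) :
    ∀ (F N : List (Int × Int)) (vis : PySem.Dict (Int × Int) Int) (visB : List (Int × Int))
      (res : List ((Int × Int) × Int)) (fuel : Nat),
    F.length ≤ fuel →
    (∀ n, (vis.get? n).isSome ↔ n ∈ visB) →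
    (∀ n d, vis.get? n = some d → d ≤ s + 1) →
    ∃ vis',
      loopA graph M fuel (F.map (fun n => (n, s)) ++ N.map (fun n => (n, s + 1))) vis res
        = loopA graph M (fuel - F.length)
            ((expandB graph F (N, visB)).1.map (fun n => (n, s + 1))) vis'
            (res ++ F.map (fun n => (n, s))) ∧
      (∀ n, (vis'.get? n).isSome ↔ n ∈ (expandB graph F (N, visB)).2) ∧
      (∀ n d, vis'.get? n = some d → d ≤ s + 1) := by
  intro F
  induction F with
  | nil =>
    intro N vis visB res fuel _ hR hLe
    exact ⟨vis, by simp [expandB], by simpa [expandB] using hR, hLe⟩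
  | cons f F ih =>
    intro N vis visB res fuel hfuel hR hLe
    obtain ⟨k, rfl⟩ : ∃ k, fuel = k + 1 := ⟨fuel - 1, by simp at hfuel; omega⟩
    rw [List.map_cons, List.cons_append, loopA]
    simp only [le_of_lt hs, if_pos, not_le.2 hs, if_false]
    obtain ⟨vis1, h1, hR1, hLe1⟩ :=
      pushNbrs_eq graph f s (F.map (fun n => (n, s)) ++ N.map (fun n => (n, s + 1))) vis visB hR hLe
    rw [h1]
    have hq : (F.map (fun n => (n, s)) ++ N.map (fun n => (n, s + 1)))
        ++ (freshL visB (nbrsOf graph f)).map (fun n => (n, s + 1))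
        = F.map (fun n => (n, s)) ++ (N ++ freshL visB (nbrsOf graph f)).map (fun n => (n, s + 1)) := by
      simp
    have hexp : expandB graph (f :: F) (N, visB)
        = expandB graph F (N ++ freshL visB (nbrsOf graph f), visB ++ freshL visB (nbrsOf graph f)) := by
      simp only [expandB, List.foldl_cons]
      rw [collectNew_eq_freshL]
    have hR1' : ∀ n, (vis1.get? n).isSome ↔ n ∈ visB ++ freshL visB (nbrsOf graph f) := hR1
    obtain ⟨vis2, h2, hR2, hLe2⟩ :=
      ih (N ++ freshL visB (nbrsOf graph f)) vis1 (visB ++ freshL visB (nbrsOf graph f))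
        (res ++ [(f, s)]) k (by simp at hfuel ⊢; omega) hR1' hLe1
    refine ⟨vis2, ?_, by rw [hexp]; exact hR2, hLe2⟩
    simp only [hq]
    rw [h2, hexp]
    simp

lemma finalA (graph : List (Int × Int × List (Int × Int))) (M : Int) :
    ∀ (F : List (Int × Int)) (vis : PySem.Dict (Int × Int) Int)
      (res : List ((Int × Int) × Int)) (fuel : Nat),
    F.length ≤ fuel →
    loopA graph M fuel (F.map (fun n => (n, M))) vis res = res ++ F.map (fun n => (n, M)) := by
  intro F
  induction F with
  | nil => intro vis res fuel _; simp [loopA_nil]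
  | cons f F ih =>
    intro vis res fuel hfuel
    simp at hfuel
    obtain ⟨fuel, rfl⟩ : ∃ k, fuel = k + 1 := ⟨fuel - 1, by omega⟩
    rw [List.map_cons, loopA]
    simp only [le_refl, if_pos]
    rw [ih vis _ fuel (by omega)]
    simp

lemma mainL (graph : List (Int × Int × List (Int × Int))) (M : Int) :
    ∀ (r : Nat) (F : List (Int × Int)) (vis : PySem.Dict (Int × Int) Int)
      (visB : List (Int × Int)) (res : List ((Int × Int) × Int)) (fuel : Nat),
    needed graph r F visB ≤ fuel →
    (∀ n, (vis.get? n).isSome ↔ n ∈ visB) →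
    (∀ n d, vis.get? n = some d → d ≤ M - r + 1) →
    loopA graph M fuel (F.map (fun n => (n, M - r))) vis res
      = loopB graph r (M - r) F visB res := by
  intro r
  induction r with
  | zero =>
    intro F vis visB res fuel hfuel hR hLe
    simp only [Nat.cast_zero, sub_zero]
    rw [finalA graph M F vis res fuel (by simpa [needed] using hfuel)]
    rfl
  | succ r ih =>
    intro F vis visB res fuel hfuel hR hLe
    have hs : M - (↑(r + 1) : Int) < M := by push_cast; omega
    have hLe' : ∀ n d, vis.get? n = some d → d ≤ (M - (↑(r + 1) : Int)) + 1 := by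
      intro n d hd
      have := hLe n d hd
      push_cast at this ⊢
      omega
    have hflen : F.length ≤ fuel := by
      have : needed graph (r + 1) F visB = F.length
          + needed graph r (expandB graph F ([], visB)).1 (expandB graph F ([], visB)).2 := rfl
      omega
    obtain ⟨vis1, h1, hR1, hLe1⟩ :=
      levelA graph M (M - (↑(r + 1) : Int)) hs F [] vis visB res fuel hflen hR hLe'
    simp only [List.map_nil, List.append_nil] at h1
    rw [h1]
    have harith : M - (↑(r + 1) : Int) + 1 = M - (↑r : Int) := by push_cast; omega
    rw [loopB]
    by_cases hnil : (expandB graph F ([], visB)).1 = []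
    · rw [hnil]
      simp only [List.map_nil, loopA_nil, if_pos]
    · rw [if_neg hnil]
      rw [harith]
      apply ih
      · have : needed graph (r + 1) F visB = F.length
            + needed graph r (expandB graph F ([], visB)).1 (expandB graph F ([], visB)).2 := rfl
        omega
      · exact hR1
      · intro n d hd
        have := hLe1 n d hd
        push_cast at this ⊢
        omega

lemma expandB_props (graph : List (Int × Int × List (Int × Int))) :
    ∀ (F nf visB : List (Int × Int)), nf.Nodup → (∀ n ∈ nf, n ∈ visB) →
    (expandB graph F (nf, visB)).1.Nodup ∧
    (∀ n ∈ (expandB graph F (nf, visB)).1, n ∈ nf ∨ ∃ f ∈ F, n ∈ nbrsOf graph f) ∧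
    (∀ n ∈ (expandB graph F (nf, visB)).1, n ∈ (expandB graph F (nf, visB)).2) := by
  intro F
  induction F with
  | nil =>
    intro nf visB h1 h2
    exact ⟨h1, fun n hn => Or.inl hn, by simpa [expandB] using h2⟩
  | cons f F ih =>
    intro nf visB h1 h2
    have hexp : expandB graph (f :: F) (nf, visB)
        = expandB graph F (nf ++ freshL visB (nbrsOf graph f), visB ++ freshL visB (nbrsOf graph f)) := by
      simp only [expandB, List.foldl_cons]
      rw [collectNew_eq_freshL]
    have hnd : (nf ++ freshL visB (nbrsOf graph f)).Nodup := by
      refine List.Nodup.append h1 (freshL_nodup _ _) ?_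
      intro x hx hx2
      exact (freshL_mem _ _ hx2).2 (h2 x hx)
    have hsub : ∀ n ∈ nf ++ freshL visB (nbrsOf graph f),
        n ∈ visB ++ freshL visB (nbrsOf graph f) := by
      intro n hn
      rcases List.mem_append.1 hn with h | h
      · exact List.mem_append.2 (Or.inl (h2 n h))
      · exact List.mem_append.2 (Or.inr h)
    obtain ⟨c1, c2, c3⟩ := ih (nf ++ freshL visB (nbrsOf graph f))
      (visB ++ freshL visB (nbrsOf graph f)) hnd hsub
    rw [hexp]
    refine ⟨c1, ?_, c3⟩
    intro n hn
    rcases c2 n hn with h | ⟨f', hf', hn'⟩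
    · rcases List.mem_append.1 h with h | h
      · exact Or.inl h
      · exact Or.inr ⟨f, List.mem_cons_self, (freshL_mem _ _ h).1⟩
    · exact Or.inr ⟨f', List.mem_cons_of_mem _ hf', hn'⟩

lemma nbrsOf_subset (graph : List (Int × Int × List (Int × Int)))
    (hcl : ∀ e ∈ graph, ∀ nb ∈ e.2.2, nb ∈ keysOf graph) (n : Int × Int) :
    ∀ nb ∈ nbrsOf graph n, nb ∈ keysOf graph := by
  intro nb hnb
  unfold nbrsOf at hnb
  rcases h : graph.find? (fun e => (e.1, e.2.1) == n) with _ | e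
  · rw [h] at hnb; simp at hnb
  · rw [h] at hnb
    exact hcl e (List.mem_of_find?_eq_some h) nb hnb

lemma neededBound (graph : List (Int × Int × List (Int × Int)))
    (hcl : ∀ e ∈ graph, ∀ nb ∈ e.2.2, nb ∈ keysOf graph) :
    ∀ (r : Nat) (F visB : List (Int × Int)),
    needed graph r F visB ≤ F.length + r * graph.length := by
  intro r
  induction r with
  | zero => intro F visB; simp [needed]
  | succ r ih =>
    intro F visB
    have hstep : needed graph (r + 1) F visB = F.length
        + needed graph r (expandB graph F ([], visB)).1 (expandB graph F ([], visB)).2 := rfl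
    obtain ⟨c1, c2, _⟩ := expandB_props graph F [] visB List.nodup_nil (by simp)
    have hsub : (expandB graph F ([], visB)).1 ⊆ keysOf graph := by
      intro x hx
      rcases c2 x hx with h | ⟨f, _, hn⟩
      · simp at h
      · exact nbrsOf_subset graph hcl f x hn
    have hlen : (expandB graph F ([], visB)).1.length ≤ graph.length := by
      calc (expandB graph F ([], visB)).1.length
          = (expandB graph F ([], visB)).1.toFinset.card := (List.toFinset_card_of_nodup c1).symm
        _ ≤ (keysOf graph).toFinset.card := Finset.card_le_card (fun x hx => by
            simp only [List.mem_toFinset] at hx ⊢; exact hsub hx)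
        _ ≤ (keysOf graph).length := (keysOf graph).toFinset_card_le
        _ = graph.length := by simp [keysOf]
    have := ih (expandB graph F ([], visB)).1 (expandB graph F ([], visB)).2
    have hm : (r + 1) * graph.length = r * graph.length + graph.length := Nat.succ_mul _ _
    omega

-- ===== VERDICT (by name: the statement is the Claim_ definition above) =====
theorem bfs_with_max_steps_spec : Claim_equal_bfs_with_max_steps := by
  intro graph start M _ hpre
  unfold Spec_bfs_with_max_steps bfs_with_max_steps bfs_with_max_steps_alt
  by_cases hM : M < 0
  · rw [if_pos hM]
    have ht : M.toNat = 0 := Int.toNat_eq_zero.mpr hM.le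
    rw [ht]
    show loopA graph M (0 + 1) [(start, 0)] (PySem.Dict.empty.insert start 0) [] = []
    rw [loopA]
    simp only [not_le.2 hM, if_false, if_pos (le_of_lt hM), loopA_nil]
  · rw [if_neg hM]
    rw [not_lt] at hM
    have hM0 : M - (↑M.toNat : Int) = 0 := by
      rw [Int.toNat_of_nonneg hM]; ring
    have hq : ([(start, (0 : Int))] : List ((Int × Int) × Int))
        = [start].map (fun n => (n, M - (↑M.toNat : Int))) := by
      simp only [List.map_cons, List.map_nil, hM0]
    rw [hq]
    have hmain := mainL graph M M.toNat [start] (PySem.Dict.empty.insert start 0)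
      (PySem.Set.ofList [start]) [] (graph.length * M.toNat + 1)
      (by
        rcases hpre with h0 | ⟨_, hcl⟩
        · have : M = 0 := le_antisymm h0 hM
          subst this
          simp [needed]
        · have := neededBound graph hcl M.toNat [start] (PySem.Set.ofList [start])
          have hc : M.toNat * graph.length = graph.length * M.toNat := Nat.mul_comm _ _
          simp only [List.length_singleton] at this
          omega)
      (by
        intro n
        rw [PySem.Dict.get?_insert]
        by_cases hn : n = start <;>
          simp [hn, PySem.Dict.get?_empty, PySem.Set.mem_ofList])
      (by
        intro n d hd
        rw [PySem.Dict.get?_insert] at hd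
        by_cases hn : n = start
        · simp [hn] at hd
          omega
        · simp [hn, PySem.Dict.get?_empty] at hd)
    rw [hmain, hM0]
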